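-- pv_equiv track=rewrite | github.com/mahrens917/ci_shared | ci_tools/scripts/documentation_guard.py | group_missing_docs
-- ===== SOURCE A (Python) =====
-- from typing import Callable, List, Tuple
--
-- CATEGORY_KEYS = [
--     ("Base", "base"),
--     ("Modules", "modules"),
--     ("Architecture", "architecture"),
--     ("Domains", "domains"),
--     ("Operations", "operations"),
--     ("Reference", "reference"),
-- ]
--
-- def group_missing_docs(
--     missing: List[str], discovery_info: dict
-- ) -> dict[str, List[str]]:
--     """Group missing documentation files by category."""
--     grouped: dict[str, List[str]] = {label: [] for label, _ in CATEGORY_KEYS}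
--     for doc in missing:
--         for label, key in CATEGORY_KEYS:
--             category_docs = discovery_info.get(key)
--             if category_docs is not None and doc in category_docs:
--                 grouped[label].append(doc)
--                 break
--     return grouped
-- ===== SOURCE B (Python) =====
-- from typing import List
--
-- CATEGORY_KEYS = [
--     ("Base", "base"),
--     ("Modules", "modules"),
--     ("Architecture", "architecture"),
--     ("Domains", "domains"),
--     ("Operations", "operations"),
--     ("Reference", "reference"),
-- ]
--
-- def group_missing_docs(
--     missing: List[str], discovery_info: dict
-- ) -> dict[str, List[str]]:
--     """Group missing documentation files by category (reverse-built index, one lookup per doc)."""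
--     doc_label: dict[str, str] = {}
--     for label, key in reversed(CATEGORY_KEYS):
--         for doc in discovery_info.get(key, []):
--             doc_label[doc] = label
--     grouped: dict[str, List[str]] = {label: [] for label, _ in CATEGORY_KEYS}
--     for doc in missing:
--         label = doc_label.get(doc)
--         if label is not None:
--             grouped[label].append(doc)
--     return grouped
-- ===== Notes on version B (the rewrite author's own statement) =====
-- stated objective: faster
-- what changed: Instead of scanning every category's doc list for each missing doc (first match breaks), B builds a doc->label index once by iterating the categories in reverse (so the earliest category wins via overwrite) and then does a single dict lookup per missing doc.
import Mathlib
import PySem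

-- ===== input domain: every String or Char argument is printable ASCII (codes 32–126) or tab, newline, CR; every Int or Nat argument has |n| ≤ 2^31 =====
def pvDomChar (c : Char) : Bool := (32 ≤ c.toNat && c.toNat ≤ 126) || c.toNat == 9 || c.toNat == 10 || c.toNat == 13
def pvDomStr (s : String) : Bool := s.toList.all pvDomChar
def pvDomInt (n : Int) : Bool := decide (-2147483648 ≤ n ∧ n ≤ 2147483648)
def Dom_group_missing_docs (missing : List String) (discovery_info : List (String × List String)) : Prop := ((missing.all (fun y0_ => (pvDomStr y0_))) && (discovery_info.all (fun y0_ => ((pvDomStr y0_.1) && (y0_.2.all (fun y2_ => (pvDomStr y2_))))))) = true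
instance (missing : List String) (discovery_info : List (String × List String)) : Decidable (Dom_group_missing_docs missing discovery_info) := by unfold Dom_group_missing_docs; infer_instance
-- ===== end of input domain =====

-- B replaces A's per-doc scan over all category lists with a doc->label index built once
-- in reverse category order (overwrite = first match), then one lookup per missing doc: faster.


def pyCATEGORY_KEYS : List (String × String) :=
  [("Base", "base"), ("Modules", "modules"), ("Architecture", "architecture"),
   ("Domains", "domains"), ("Operations", "operations"), ("Reference", "reference")]

-- ===== PORT A =====
-- A's inner 'for label, key in CATEGORY_KEYS: … break' loop, returning the updated grouped dict
def pvInnerA (d : PySem.Dict String (List String)) (doc : String)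
    (grouped : PySem.Dict String (List String)) :
    List (String × String) → PySem.Dict String (List String)
  | [] => grouped
  | (label, key) :: rest =>
      match d.get? key with
      | some cdocs =>
          if doc ∈ cdocs then grouped.modify label [] (fun l => l ++ [doc])
          else pvInnerA d doc grouped rest
      | none => pvInnerA d doc grouped rest

def group_missing_docs (missing : List String) (discovery_info : List (String × List String)) : List (String × List String) :=
  let d := PySem.Dict.mk discovery_info
  let grouped := pyCATEGORY_KEYS.foldl (fun g p => g.insert p.1 ([] : List String)) PySem.Dict.empty
  (missing.foldl (fun g doc => pvInnerA d doc g pyCATEGORY_KEYS) grouped).items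

-- ===== PORT B =====
def group_missing_docs_alt (missing : List String) (discovery_info : List (String × List String)) : List (String × List String) :=
  let d := PySem.Dict.mk discovery_info
  let docLabel := pyCATEGORY_KEYS.reverse.foldl
      (fun m p => (d.getD p.2 []).foldl (fun m doc => m.insert doc p.1) m)
      (PySem.Dict.empty : PySem.Dict String String)
  let grouped := pyCATEGORY_KEYS.foldl (fun g p => g.insert p.1 ([] : List String)) PySem.Dict.empty
  (missing.foldl (fun g doc =>
      match docLabel.get? doc with
      | some label => g.modify label [] (fun l => l ++ [doc])
      | none => g) grouped).items

-- ===== PRECONDITION & SPEC =====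
def Spec_group_missing_docs (missing : List String) (discovery_info : List (String × List String)) (out : List (String × List String)) : Prop := out = group_missing_docs_alt missing discovery_info
instance (missing : List String) (discovery_info : List (String × List String)) (out : List (String × List String)) : Decidable (Spec_group_missing_docs missing discovery_info out) := by unfold Spec_group_missing_docs; infer_instance

-- ===== CLAIM (what is proved, stated in full; the proofs are below) =====
def Claim_equal_group_missing_docs : Prop := ∀ (missing : List String) (discovery_info : List (String × List String)), Dom_group_missing_docs missing discovery_info → Spec_group_missing_docs missing discovery_info (group_missing_docs missing discovery_info)

-- ===== LEMMAS AND PROOFS =====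

-- the label A's inner loop selects for doc (first category containing doc)
def pvFirstLabel (d : PySem.Dict String (List String)) (doc : String) :
    List (String × String) → Option String
  | [] => none
  | (label, key) :: rest =>
      match d.get? key with
      | some cdocs => if doc ∈ cdocs then some label else pvFirstLabel d doc rest
      | none => pvFirstLabel d doc rest

theorem get?_foldl_insert_const (docs : List String) (label : String)
    (m : PySem.Dict String String) (x : String) :
    (docs.foldl (fun m doc => m.insert doc label) m).get? x =
      if x ∈ docs then some label else m.get? x := by
  induction docs generalizing m with
  | nil => simp
  | cons hd tl ih =>
      simp only [List.foldl_cons, ih, List.mem_cons]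
      by_cases hx : x ∈ tl
      · simp [hx]
      · by_cases he : x = hd
        · simp [he, PySem.Dict.get?_insert_self]
        · simp [hx, he, PySem.Dict.get?_insert_of_ne m _ he]

theorem get?_buildRev (d : PySem.Dict String (List String)) (cats : List (String × String))
    (doc : String) :
    (cats.reverse.foldl
        (fun m p => (d.getD p.2 []).foldl (fun m doc => m.insert doc p.1) m)
        (PySem.Dict.empty : PySem.Dict String String)).get? doc =
      pvFirstLabel d doc cats := by
  induction cats with
  | nil => simp [pvFirstLabel]
  | cons c cs ih =>
      simp only [List.reverse_cons, List.foldl_append, List.foldl_cons, List.foldl_nil]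
      rw [get?_foldl_insert_const, ih]
      cases h : d.get? c.2 with
      | some cdocs =>
          rw [PySem.Dict.getD_of_get?_eq_some _ _ h]
          simp only [pvFirstLabel]
          rw [h]
      | none =>
          rw [PySem.Dict.getD_of_get?_eq_none _ _ h]
          simp only [pvFirstLabel]
          rw [h]
          simp

theorem pvInnerA_eq_firstLabel (d : PySem.Dict String (List String)) (doc : String)
    (g : PySem.Dict String (List String)) (cats : List (String × String)) :
    pvInnerA d doc g cats =
      match pvFirstLabel d doc cats with
      | some label => g.modify label [] (fun l => l ++ [doc])
      | none => g := by
  induction cats with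
  | nil => rfl
  | cons c cs ih =>
      obtain ⟨label, key⟩ := c
      simp only [pvInnerA, pvFirstLabel]
      cases h : d.get? key with
      | some cdocs =>
          by_cases hm : doc ∈ cdocs
          · simp [hm]
          · simp [hm, ih]
      | none => exact ih

theorem group_missing_docs_eq_alt (missing : List String)
    (discovery_info : List (String × List String)) :
    group_missing_docs missing discovery_info = group_missing_docs_alt missing discovery_info := by
  unfold group_missing_docs group_missing_docs_alt
  dsimp only
  congr 1
  apply PySem.List.foldl_congr_mem
  intro g doc _hdoc
  rw [pvInnerA_eq_firstLabel, get?_buildRev]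

-- ===== VERDICT (by name: the statement is the Claim_ definition above) =====
theorem group_missing_docs_spec : Claim_equal_group_missing_docs := by
  intro missing discovery_info _
  exact group_missing_docs_eq_alt missing discovery_info
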